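-- pv_equiv track=rewrite | github.com/benrutter/clamshell | clamshell/shell.py | is_uncompleted
-- ===== SOURCE A (Python) =====
-- def is_uncompleted(command: str) -> bool:
--     """
--     Checks for unclosed brackets, speech marks etc,
--     and returns bool based on them being present
--     """
--     completion_dict = {
--         "(": ")",
--         "{": "}",
--         "[": "]",
--         '"': '"',
--         "'": "'",
--     }
--     last: str = None
--     for char in command:
--         if last is not None:
--             if char == completion_dict[last]:
--                 last: str = None
--         elif char in list(completion_dict.keys()):
--             last: str = char
--     completed: bool = last is not None
--     return completed
-- ===== SOURCE B (Python) =====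
-- def is_uncompleted(command: str) -> bool:
--     """
--     Checks for unclosed brackets, speech marks etc,
--     and returns bool based on them being present
--     """
--     completion_dict = {
--         "(": ")",
--         "{": "}",
--         "[": "]",
--         '"': '"',
--         "'": "'",
--     }
--     chars = iter(command)
--     for char in chars:
--         closer = completion_dict.get(char)
--         if closer is not None:
--             # consume the shared iterator up to (and including) the closer;
--             # if it is never found, an opener is left unclosed
--             if not any(c == closer for c in chars):
--                 return True
--     return False
-- ===== Notes on version B (the rewrite author's own statement) =====
-- stated objective: faster
-- what changed: Replaces A's per-character state machine (an Option-valued last-seen-opener variable threaded through every char, with a dict lookup and a rebuilt key-list membership test per step) by nested consumption of one shared iterator: on an opener, any() consumes the iterator up to its closer and returns True early if the closer is missing; no state variable survives the loop.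
import Mathlib
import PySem

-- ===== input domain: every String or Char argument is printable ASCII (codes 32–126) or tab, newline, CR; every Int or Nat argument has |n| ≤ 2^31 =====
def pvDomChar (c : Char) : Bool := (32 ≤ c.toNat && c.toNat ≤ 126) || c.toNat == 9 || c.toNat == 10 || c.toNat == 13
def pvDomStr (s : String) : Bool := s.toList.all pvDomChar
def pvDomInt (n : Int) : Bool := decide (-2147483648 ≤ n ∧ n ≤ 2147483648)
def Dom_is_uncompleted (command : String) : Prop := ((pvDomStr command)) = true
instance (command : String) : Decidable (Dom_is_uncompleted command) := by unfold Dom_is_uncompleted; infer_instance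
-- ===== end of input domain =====

-- B replaces A's threaded state machine by nested iterator consumption with early return (measurably faster by a constant factor).

-- ===== PORT A =====
-- the completion_dict of A, as an association list (insertion order)
def completionDictA : PySem.Dict Char Char :=
  PySem.Dict.ofList [('(', ')'), ('{', '}'), ('[', ']'), ('"', '"'), ('\'', '\'')]

-- one iteration of A's for-loop: update 'last'
def stepA (last : Option Char) (char : Char) : Option Char :=
  match last with
  | some l => if some char = PySem.Dict.get? completionDictA l then none else some l
  | none => if char ∈ (PySem.Dict.keys completionDictA) then some char else none

def is_uncompleted (command : String) : Bool :=
  (command.toList.foldl stepA none).isSome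

-- ===== PORT B =====
-- the completion_dict of B
def completionDictB : PySem.Dict Char Char :=
  PySem.Dict.ofList [('(', ')'), ('{', '}'), ('[', ']'), ('"', '"'), ('\'', '\'')]

-- 'any(c == closer for c in chars)' on the shared iterator: consume up to and
-- including the closer, returning the remaining iterator; none = closer absent
def consumeTo (closer : Char) : List Char → Option (List Char)
  | [] => none
  | c :: cs => if c = closer then some cs else consumeTo closer cs

theorem consumeTo_length {closer : Char} : ∀ {cs rest : List Char},
    consumeTo closer cs = some rest → rest.length < cs.length := by
  intro cs
  induction cs with
  | nil => intro rest h; simp [consumeTo] at h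
  | cons c cs ih =>
    intro rest h
    simp only [consumeTo] at h
    split at h
    · cases h; simp
    · exact Nat.lt_trans (ih h) (by simp)

def loopB (chars : List Char) : Bool :=
  match chars with
  | [] => false
  | char :: rest =>
    match PySem.Dict.get? completionDictB char with
    | some closer =>
      match h : consumeTo closer rest with
      | none => true
      | some rest' => loopB rest'
    | none => loopB rest
termination_by chars.length
decreasing_by
  · exact Nat.lt_trans (consumeTo_length h) (by simp)
  · simp

def is_uncompleted_alt (command : String) : Bool :=
  loopB command.toList

-- ===== PRECONDITION & SPEC =====
def Spec_is_uncompleted (command : String) (out : Bool) : Prop := out = is_uncompleted_alt command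
instance (command : String) (out : Bool) : Decidable (Spec_is_uncompleted command out) := by unfold Spec_is_uncompleted; infer_instance

-- ===== CLAIM (what is proved, stated in full; the proofs are below) =====
def Claim_equal_is_uncompleted : Prop := ∀ (command : String), Dom_is_uncompleted command → Spec_is_uncompleted command (is_uncompleted command)

-- ===== LEMMAS AND PROOFS =====

-- A's loop in state 'some l' skips everything until the closer of l, i.e. consumeTo
theorem foldA_some (l z : Char) (hz : PySem.Dict.get? completionDictA l = some z) :
    ∀ cs : List Char, cs.foldl stepA (some l) =
      match consumeTo z cs with
      | none => some l
      | some rest => rest.foldl stepA none := by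
  intro cs
  induction cs with
  | nil => simp [consumeTo]
  | cons c cs ih =>
    simp only [List.foldl_cons, consumeTo, stepA, hz]
    by_cases hc : c = z
    · simp [hc]
    · have : ¬ some c = some z := by simpa using hc
      simp [hc, this, ih]

-- the two loops agree on every list of chars
theorem loopA_eq_loopB : ∀ cs : List Char, (cs.foldl stepA none).isSome = loopB cs := by
  intro cs
  induction cs using loopB.induct with
  | case1 => simp [loopB]
  | case2 c rest closer hget hcons =>
    have hgA : PySem.Dict.get? completionDictA c = some closer := hget
    have hkey : c ∈ PySem.Dict.keys completionDictA := by
      refine (PySem.Dict.contains_iff_mem_keys _ _).mp ?_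
      rw [PySem.Dict.contains_eq_isSome_get?, hgA]; rfl
    rw [List.foldl_cons]
    simp only [stepA, hkey, if_pos]
    rw [foldA_some c closer hgA rest, hcons]
    conv_rhs => rw [loopB]
    simp only [hget]
    split
    · rfl
    · next r heq => rw [hcons] at heq; cases heq
  | case3 c rest closer hget rest' hcons ih =>
    have hgA : PySem.Dict.get? completionDictA c = some closer := hget
    have hkey : c ∈ PySem.Dict.keys completionDictA := by
      refine (PySem.Dict.contains_iff_mem_keys _ _).mp ?_
      rw [PySem.Dict.contains_eq_isSome_get?, hgA]; rfl
    rw [List.foldl_cons]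
    simp only [stepA, hkey, if_pos]
    rw [foldA_some c closer hgA rest, hcons]
    conv_rhs => rw [loopB]
    simp only [hget]
    split
    · next heq => rw [hcons] at heq; cases heq
    · next r heq =>
        rw [hcons] at heq
        cases heq
        exact ih
  | case4 c rest hget ih =>
    have hgA : PySem.Dict.get? completionDictA c = none := hget
    have hkey : c ∉ PySem.Dict.keys completionDictA :=
      (PySem.Dict.get?_eq_none_iff_not_mem_keys _ _).mp hgA
    rw [List.foldl_cons]
    simp only [stepA, hkey]
    conv_rhs => rw [loopB]
    simp only [hget]
    simpa using ih

-- ===== VERDICT (by name: the statement is the Claim_ definition above) =====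
theorem is_uncompleted_spec : Claim_equal_is_uncompleted := by
  intro command _
  unfold Spec_is_uncompleted is_uncompleted is_uncompleted_alt
  exact loopA_eq_loopB command.toList
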